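-- pv_equiv track=rewrite | github.com/Twilight-Dream-Of-Magic/KolmogorovLike-DataCompressor | final_researched/kolm_final_researched_v2-2.py | _replace_non_overlapping
-- ===== SOURCE A (Python) =====
-- from typing import List, Tuple, Dict, Callable, Optional, Any, Union
-- from typing import List, Tuple
-- from typing import List, Tuple, Dict, Any, Optional, Union
--
-- def _replace_non_overlapping(seq: List[int], target: Tuple[int,int], new_sym: int) -> Tuple[List[int], int]:
--     """Replace all non-overlapping occurrences of 'target' with new_sym, left-to-right."""
--     a, b = target
--     i = 0
--     out: List[int] = []
--     replaced = 0
--     n = len(seq)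
--     while i < n:
--         if i + 1 < n and seq[i] == a and seq[i+1] == b:
--             out.append(new_sym)
--             i += 2
--             replaced += 1
--         else:
--             out.append(seq[i])
--             i += 1
--     return out, replaced
-- ===== SOURCE B (Python) =====
-- from typing import List, Tuple
--
-- def _replace_non_overlapping(seq: List[int], target: Tuple[int, int], new_sym: int) -> Tuple[List[int], int]:
--     """Two-pass variant: first collect the start positions of the greedy
--     left-to-right non-overlapping matches, then rebuild the output from
--     slices between those positions."""
--     a, b = target
--     n = len(seq)
--     positions: List[int] = []
--     i = 0
--     while i < n - 1:
--         if seq[i] == a and seq[i + 1] == b: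
--             positions.append(i)
--             i += 2
--         else:
--             i += 1
--     out: List[int] = []
--     prev = 0
--     for p in positions:
--         out.extend(seq[prev:p])
--         out.append(new_sym)
--         prev = p + 2
--     out.extend(seq[prev:])
--     return out, len(positions)
-- ===== Notes on version B (the rewrite author's own statement) =====
-- stated objective: alternative
-- what changed: the single interleaved scan-and-build loop is split into a detection pass that records match start positions and a separate slice-based reconstruction pass
import Mathlib
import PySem

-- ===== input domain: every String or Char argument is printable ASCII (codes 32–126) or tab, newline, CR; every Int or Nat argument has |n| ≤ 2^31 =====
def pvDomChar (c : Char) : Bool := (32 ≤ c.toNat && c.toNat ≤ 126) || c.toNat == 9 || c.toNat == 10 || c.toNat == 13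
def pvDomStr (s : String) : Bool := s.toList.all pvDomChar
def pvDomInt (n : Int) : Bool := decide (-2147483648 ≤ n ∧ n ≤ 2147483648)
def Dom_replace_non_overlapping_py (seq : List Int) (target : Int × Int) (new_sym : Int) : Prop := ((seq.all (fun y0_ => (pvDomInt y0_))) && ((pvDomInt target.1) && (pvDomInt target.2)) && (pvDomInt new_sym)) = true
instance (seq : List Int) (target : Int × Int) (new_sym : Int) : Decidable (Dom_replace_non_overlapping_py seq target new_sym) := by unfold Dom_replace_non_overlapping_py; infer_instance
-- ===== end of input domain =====

-- B splits A's single interleaved scan-and-build loop into a detection pass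
-- (collect match start positions) plus a slice-based reconstruction pass;
-- same O(n) cost, different decomposition.


-- ===== PORT A =====
-- A's while-loop over index i, rendered as the equivalent recursion over the
-- remaining suffix of seq (the loop only ever looks at seq[i], seq[i+1], i.e.
-- the first two elements of the suffix; 'i + 1 < n' is 'the suffix has ≥ 2
-- elements'); out.append becomes cons onto the recursive result.
def loopA (a b new_sym : Int) : List Int → List Int × Int
  | [] => ([], 0)
  | [x] => ([x], 0)
  | x :: y :: rest =>
    if x = a ∧ y = b then
      let r := loopA a b new_sym rest
      (new_sym :: r.1, r.2 + 1)
    else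
      let r := loopA a b new_sym (y :: rest)
      (x :: r.1, r.2)
  termination_by l => l.length

def replace_non_overlapping_py (seq : List Int) (target : Int × Int) (new_sym : Int) : List Int × Int :=
  loopA target.1 target.2 new_sym seq

-- ===== PORT B =====
-- detection pass: B's first while loop ('while i < n - 1', Python semantics:
-- for n = 0 the condition i < -1 is false, matching i + 1 < n on Nat).
-- seq[i] with 0 ≤ i < n is exactly getD i 0 (index always in range here).
def detectB (a b : Int) (seq : List Int) (i : Nat) : List Nat :=
  if _h : i + 1 < seq.length then
    if seq.getD i 0 = a ∧ seq.getD (i + 1) 0 = b then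
      i :: detectB a b seq (i + 2)
    else
      detectB a b seq (i + 1)
  else []
  termination_by seq.length - i

-- reconstruction pass: B's for-loop over positions, with accumulator (out, prev).
-- seq[prev:p] with 0 ≤ prev ≤ p ≤ n is exactly (seq.drop prev).take (p - prev).
def reconLoopB (seq : List Int) (new_sym : Int) : List Int → Nat → List Nat → List Int × Nat
  | out, prev, [] => (out, prev)
  | out, prev, p :: ps =>
    reconLoopB seq new_sym (out ++ (seq.drop prev).take (p - prev) ++ [new_sym]) (p + 2) ps

def replace_non_overlapping_py_alt (seq : List Int) (target : Int × Int) (new_sym : Int) : List Int × Int :=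
  let positions := detectB target.1 target.2 seq 0
  let r := reconLoopB seq new_sym [] 0 positions
  (r.1 ++ seq.drop r.2, (positions.length : Int))

-- ===== PRECONDITION & SPEC =====
def Spec_replace_non_overlapping_py (seq : List Int) (target : Int × Int) (new_sym : Int) (out : List Int × Int) : Prop := out = replace_non_overlapping_py_alt seq target new_sym
instance (seq : List Int) (target : Int × Int) (new_sym : Int) (out : List Int × Int) : Decidable (Spec_replace_non_overlapping_py seq target new_sym out) := by unfold Spec_replace_non_overlapping_py; infer_instance

-- ===== CLAIM (what is proved, stated in full; the proofs are below) =====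
def Claim_equal_replace_non_overlapping_py : Prop := ∀ (seq : List Int) (target : Int × Int) (new_sym : Int), Dom_replace_non_overlapping_py seq target new_sym → Spec_replace_non_overlapping_py seq target new_sym (replace_non_overlapping_py seq target new_sym)

-- ===== LEMMAS AND PROOFS =====

-- pure (accumulator-free) form of the reconstruction pass
def reconP (seq : List Int) (new_sym : Int) : Nat → List Nat → List Int
  | prev, [] => seq.drop prev
  | prev, p :: ps => (seq.drop prev).take (p - prev) ++ new_sym :: reconP seq new_sym (p + 2) ps

theorem reconLoopB_eq (seq : List Int) (new_sym : Int) :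
    ∀ (ps : List Nat) (out : List Int) (prev : Nat),
      (reconLoopB seq new_sym out prev ps).1 ++ seq.drop (reconLoopB seq new_sym out prev ps).2
        = out ++ reconP seq new_sym prev ps := by
  intro ps
  induction ps with
  | nil => intro out prev; simp [reconLoopB, reconP]
  | cons p ps ih =>
    intro out prev
    simp [reconLoopB, reconP, ih, List.append_assoc]

theorem detectB_ge (a b : Int) (seq : List Int) :
    ∀ (i : Nat) (p : Nat), p ∈ detectB a b seq i → i ≤ p := by
  intro i
  induction i using detectB.induct a b seq with
  | case1 i h hm ih =>
    intro p hp
    rw [detectB, dif_pos h, if_pos hm] at hp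
    rcases List.mem_cons.mp hp with rfl | hp
    · exact le_refl _
    · exact le_trans (by omega) (ih p hp)
  | case2 i h hm ih =>
    intro p hp
    rw [detectB, dif_pos h, if_neg hm] at hp
    exact le_trans (by omega) (ih p hp)
  | case3 i h =>
    intro p hp
    rw [detectB] at hp
    simp [h] at hp

theorem loopA_short (a b new_sym : Int) (l : List Int) (h : l.length ≤ 1) :
    loopA a b new_sym l = (l, 0) := by
  match l with
  | [] => simp [loopA]
  | [x] => simp [loopA]
  | x :: y :: rest => simp at h

theorem main_lemma (a b new_sym : Int) (seq : List Int) :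
    ∀ (i : Nat),
      loopA a b new_sym (seq.drop i)
        = (reconP seq new_sym i (detectB a b seq i), ((detectB a b seq i).length : Int)) := by
  intro i
  induction i using detectB.induct a b seq with
  | case1 i h hm ih =>
    have hi : i < seq.length := by omega
    have hi1 : i + 1 < seq.length := h
    have hdrop : seq.drop i = seq[i] :: seq[i + 1] :: seq.drop (i + 2) := by
      rw [List.drop_eq_getElem_cons hi, List.drop_eq_getElem_cons hi1]
    have hga : seq.getD i 0 = seq[i] := List.getD_eq_getElem _ _ hi
    have hgb : seq.getD (i + 1) 0 = seq[i + 1] := List.getD_eq_getElem _ _ hi1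
    rw [detectB, dif_pos h, if_pos hm]
    rw [hdrop, loopA]
    rw [if_pos ⟨by rw [← hga]; exact hm.1, by rw [← hgb]; exact hm.2⟩]
    rw [ih]
    simp [reconP]
  | case2 i h hm ih =>
    have hi : i < seq.length := by omega
    have hi1 : i + 1 < seq.length := h
    have hdrop : seq.drop i = seq[i] :: seq.drop (i + 1) := List.drop_eq_getElem_cons hi
    have hga : seq.getD i 0 = seq[i] := List.getD_eq_getElem _ _ hi
    have hgb : seq.getD (i + 1) 0 = seq[i + 1] := List.getD_eq_getElem _ _ hi1
    have hdrop1 : seq.drop (i + 1) = seq[i + 1] :: seq.drop (i + 2) := List.drop_eq_getElem_cons hi1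
    rw [detectB, dif_pos h, if_neg hm]
    have hne : ¬ (seq[i] = a ∧ seq[i + 1] = b) := by rw [← hga, ← hgb]; exact hm
    rw [hdrop, hdrop1, loopA, if_neg hne, ← hdrop1, ih]
    -- relate reconP at i with reconP at i+1 given all positions ≥ i+1
    cases hps : detectB a b seq (i + 1) with
    | nil =>
      simp only [reconP, List.length_nil]
      rw [hdrop]
    | cons p ps =>
      have hp : i + 1 ≤ p := detectB_ge a b seq (i + 1) p (by rw [hps]; exact List.mem_cons_self ..)
      simp only [reconP]
      have ht : (seq.drop i).take (p - i) = seq[i] :: (seq.drop (i + 1)).take (p - (i + 1)) := by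
        rw [hdrop]
        have : p - i = (p - (i + 1)) + 1 := by omega
        rw [this, List.take_succ_cons]
      rw [ht]
      simp
  | case3 i h =>
    have hlen : (seq.drop i).length ≤ 1 := by simp; omega
    rw [detectB, dif_neg h]
    rw [loopA_short a b new_sym _ hlen]
    simp [reconP]

-- ===== VERDICT (by name: the statement is the Claim_ definition above) =====
theorem replace_non_overlapping_py_spec : Claim_equal_replace_non_overlapping_py := by
  intro seq target new_sym _
  unfold Spec_replace_non_overlapping_py replace_non_overlapping_py replace_non_overlapping_py_alt
  have h := main_lemma target.1 target.2 new_sym seq 0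
  rw [List.drop_zero] at h
  have hr := reconLoopB_eq seq new_sym (detectB target.1 target.2 seq 0) [] 0
  rw [List.nil_append] at hr
  rw [h]
  exact Prod.ext (by rw [← hr]) rfl
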